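-- pv_equiv track=rewrite | github.com/antoha-x/web_test | helpers/utils.py | normalize_file_name
-- ===== SOURCE A (Python) =====
-- def normalize_file_name(file_name):
--     replace_symbols = {
--         '"': "'",
--         ">": "",
--         "<": "",
--         "\\": "",
--         "|": "",
--         "/": "_",
--         ":": "",
--         "*": "",
--         "?": ""
--     }
--     for key, value in replace_symbols.items():
--         file_name = file_name.replace(key, value)
--     return file_name
-- ===== SOURCE B (Python) =====
-- def normalize_file_name(file_name):
--     chars = []
--     for ch in file_name:
--         if ch == '"':
--             chars.append("'")
--         elif ch == '/':
--             chars.append('_')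
--         elif ch in '><\\|:*?':
--             pass
--         else:
--             chars.append(ch)
--     return ''.join(chars)
-- ===== Notes on version B (the rewrite author's own statement) =====
-- stated objective: simpler
-- what changed: Replaces the ten full-string replace() passes driven by a dict with a single explicit loop over the characters that appends each character's replacement (quote->apostrophe, slash->underscore, other forbidden chars dropped) to an accumulator list and joins it once.
import Mathlib
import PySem

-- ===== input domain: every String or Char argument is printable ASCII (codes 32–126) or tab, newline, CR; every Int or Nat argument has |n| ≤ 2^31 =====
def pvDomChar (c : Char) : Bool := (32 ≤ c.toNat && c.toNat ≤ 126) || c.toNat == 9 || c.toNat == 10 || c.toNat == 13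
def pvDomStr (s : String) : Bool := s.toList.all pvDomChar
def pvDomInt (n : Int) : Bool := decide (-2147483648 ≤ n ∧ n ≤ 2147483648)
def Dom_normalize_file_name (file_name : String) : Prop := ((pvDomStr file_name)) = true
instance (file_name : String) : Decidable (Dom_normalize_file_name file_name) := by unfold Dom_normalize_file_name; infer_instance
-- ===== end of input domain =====

-- B replaces A's ten full-string replace() passes with one explicit per-character
-- loop (append each character's replacement to an accumulator, join once) — simpler, same result.


-- ===== PORT A =====
-- A's replacement dict, and: for key, value in replace_symbols.items(): file_name = file_name.replace(key, value)
def pvReplaceSymbols : PySem.Dict String String :=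
  PySem.Dict.ofList [("\"", "'"), (">", ""), ("<", ""), ("\\", ""), ("|", ""),
                     ("/", "_"), (":", ""), ("*", ""), ("?", "")]

def normalize_file_name (file_name : String) : String :=
  pvReplaceSymbols.items.foldl (fun fn kv => PySem.Str.replace fn kv.1 kv.2) file_name

-- ===== PORT B =====
-- per-character if/elif chain of Source B's loop body: what gets appended for ch
def nfnMapChar (ch : Char) : List Char :=
  if ch = '"' then ['\'']
  else if ch = '/' then ['_']
  else if ch ∈ ['>', '<', '\\', '|', ':', '*', '?'] then []
  else [ch]

-- chars = []; for ch in file_name: chars.append(...); return ''.join(chars)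
def normalize_file_name_alt (file_name : String) : String :=
  String.ofList (file_name.toList.foldl (fun acc ch => acc ++ nfnMapChar ch) [])

-- ===== PRECONDITION & SPEC =====
def Spec_normalize_file_name (file_name : String) (out : String) : Prop := out = normalize_file_name_alt file_name
instance (file_name : String) (out : String) : Decidable (Spec_normalize_file_name file_name out) := by unfold Spec_normalize_file_name; infer_instance

-- ===== CLAIM (what is proved, stated in full; the proofs are below) =====
def Claim_equal_normalize_file_name : Prop := ∀ (file_name : String), Dom_normalize_file_name file_name → Spec_normalize_file_name file_name (normalize_file_name file_name)

-- ===== LEMMAS AND PROOFS =====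

-- single-character replace is a flatMap
theorem replace_go_single (k : Char) (v : List Char) :
    ∀ (fuel : Nat) (l acc : List Char), l.length ≤ fuel →
      PySem.Chars.replace.go [k] v fuel l acc
        = acc.reverse ++ l.flatMap (fun c => if c = k then v else [c]) := by
  intro fuel
  induction fuel with
  | zero =>
    intro l acc h
    have : l = [] := List.eq_nil_of_length_eq_zero (Nat.le_zero.mp h)
    subst this
    simp [PySem.Chars.replace.go]
  | succ n ih =>
    intro l acc h
    cases l with
    | nil => simp [PySem.Chars.replace.go]
    | cons c t =>
      by_cases hc : k = c
      · subst hc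
        have hpre : [k].isPrefixOf (k :: t) = true := by simp [List.isPrefixOf]
        rw [PySem.Chars.replace.go, if_pos hpre]
        have ht : t.length ≤ n := by simpa using h
        simp only [List.length_singleton, List.drop_one, List.tail_cons]
        rw [ih t (v.reverse ++ acc) ht]
        simp
      · have hpre : [k].isPrefixOf (c :: t) = false := by
          simp [List.isPrefixOf]
          exact hc
        rw [PySem.Chars.replace.go, if_neg (by simp [hpre])]
        have ht : t.length ≤ n := by simpa using h
        rw [ih t (c :: acc) ht]
        simp [Ne.symm hc]

theorem replace_single (s : List Char) (k : Char) (v : List Char) :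
    PySem.Chars.replace s [k] v = s.flatMap (fun c => if c = k then v else [c]) := by
  rw [PySem.Chars.replace]
  simp only [List.isEmpty_cons, Bool.false_eq_true, if_false]
  exact replace_go_single k v s.length s [] (le_refl _)

-- ===== VERDICT (by name: the statement is the Claim_ definition above) =====
theorem normalize_file_name_spec : Claim_equal_normalize_file_name := by
  intro s _
  unfold Spec_normalize_file_name normalize_file_name normalize_file_name_alt
  have hitems : pvReplaceSymbols.items =
      [("\"", "'"), (">", ""), ("<", ""), ("\\", ""), ("|", ""),
       ("/", "_"), (":", ""), ("*", ""), ("?", "")] := by decide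
  rw [← String.toList_inj]
  rw [hitems]
  simp only [List.foldl_cons, List.foldl_nil]
  rw [String.toList_ofList]
  rw [PySem.List.foldl_append_eq_flatMap]
  rw [List.nil_append]
  simp only [PySem.Str.toList_replace]
  simp only [show ("\"" : String).toList = ['"'] from rfl,
             show ("'" : String).toList = ['\''] from rfl,
             show (">" : String).toList = ['>'] from rfl,
             show ("<" : String).toList = ['<'] from rfl,
             show ("\\" : String).toList = ['\\'] from rfl,
             show ("|" : String).toList = ['|'] from rfl,
             show ("/" : String).toList = ['/'] from rfl,
             show ("_" : String).toList = ['_'] from rfl,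
             show (":" : String).toList = [':'] from rfl,
             show ("*" : String).toList = ['*'] from rfl,
             show ("?" : String).toList = ['?'] from rfl,
             show ("" : String).toList = [] from rfl]
  simp only [replace_single, List.flatMap_assoc]
  apply List.flatMap_congr
  intro c _
  by_cases h1 : c = '"'; · subst h1; decide
  by_cases h2 : c = '>'; · subst h2; decide
  by_cases h3 : c = '<'; · subst h3; decide
  by_cases h4 : c = '\\'; · subst h4; decide
  by_cases h5 : c = '|'; · subst h5; decide
  by_cases h6 : c = '/'; · subst h6; decide
  by_cases h7 : c = ':'; · subst h7; decide
  by_cases h8 : c = '*'; · subst h8; decide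
  by_cases h9 : c = '?'; · subst h9; decide
  simp [nfnMapChar, h1, h2, h3, h4, h5, h6, h7, h8, h9]
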